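-- pv_equiv track=rewrite | github.com/JoseIgnacioNN/AraincoRevitTools | scripts/geometria_columnas_eje.py | _conteos_por_cara_parejas_opuestas
-- ===== SOURCE A (Python) =====
-- def _conteos_por_cara_parejas_opuestas(total_curvas, num_caras):
--     """
--     Reparto equitativo de ``total_curvas`` entre ``num_caras``. Si ``num_caras`` es par,
--     reparte primero entre parejas de caras opuestas (0↔F/2, 1↔F/2+1); dentro de cada par,
--     divide lo más equilibrado posible. Si es impar, ``divmod`` clásico.
--     """
--     F = int(num_caras)
--     if F <= 0:
--         return []
--     try:
--         N = max(0, int(total_curvas))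
--     except Exception:
--         N = 0
--     if F % 2 != 0:
--         base, rem = divmod(N, F)
--         return [base + (1 if i < rem else 0) for i in range(F)]
--     n_pairs = F // 2
--     if n_pairs == 0:
--         return [0] * F
--     counts = [0] * F
--     base_pair, rem_pair = divmod(N, n_pairs)
--     for p in range(n_pairs):
--         T = base_pair + (1 if p < rem_pair else 0)
--         a = T // 2
--         b = T - a
--         counts[p] = a
--         counts[p + n_pairs] = b
--     return counts
-- ===== SOURCE B (Python) =====
-- def _conteos_por_cara_parejas_opuestas(total_curvas, num_caras):
--     """Greedy peeling instead of closed-form divmod distribution: repeatedly hand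
--     the next slot its fair share ceil(remaining/slots_left) and continue with the
--     remainder; for even F the slots are the opposite pairs, whose totals are then
--     split into floor/rest halves."""
--     F = int(num_caras)
--     if F <= 0:
--         return []
--     try:
--         N = max(0, int(total_curvas))
--     except Exception:
--         N = 0
--
--     def deal(n, m):
--         out = []
--         while m > 0:
--             q = -(-n // m)          # ceil(n / m): the fair share of the next slot
--             out.append(q)
--             n -= q
--             m -= 1
--         return out
--
--     if F % 2 != 0:
--         return deal(N, F)
--     h = F // 2
--     totals = deal(N, h)
--     return [t // 2 for t in totals] + [t - t // 2 for t in totals]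
-- ===== Notes on version B (the rewrite author's own statement) =====
-- stated objective: alternative
-- what changed: Replaces the closed-form divmod distribution (base + 1-for-the-first-rem via index comparison, written into a preallocated counts array) with a greedy peeling loop that repeatedly hands the next slot ceil(remaining/slots_left) and recurses on the shrunken remainder, then splits each pair total into floor/rest halves by two comprehensions.
import Mathlib
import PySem

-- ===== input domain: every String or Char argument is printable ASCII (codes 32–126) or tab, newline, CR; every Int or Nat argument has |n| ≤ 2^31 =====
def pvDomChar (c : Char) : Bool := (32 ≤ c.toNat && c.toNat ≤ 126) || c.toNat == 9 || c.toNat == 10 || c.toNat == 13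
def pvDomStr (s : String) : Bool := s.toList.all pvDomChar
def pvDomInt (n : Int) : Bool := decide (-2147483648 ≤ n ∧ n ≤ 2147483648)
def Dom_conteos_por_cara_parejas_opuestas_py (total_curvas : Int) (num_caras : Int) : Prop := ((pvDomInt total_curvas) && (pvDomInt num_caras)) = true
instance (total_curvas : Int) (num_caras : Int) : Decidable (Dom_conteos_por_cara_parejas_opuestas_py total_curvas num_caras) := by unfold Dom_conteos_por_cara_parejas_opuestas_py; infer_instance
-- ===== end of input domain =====

-- B replaces the closed-form divmod distribution with a greedy peeling loop (each slot takes ceil(remaining/slots_left)); objective: alternative.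

-- ===== PORT A =====
def conteos_por_cara_parejas_opuestas_py (total_curvas : Int) (num_caras : Int) : List Int :=
  let F := num_caras
  if F ≤ 0 then []
  else
    let N := max 0 total_curvas
    if PySem.Int.mod F 2 ≠ 0 then
      let base := PySem.Int.floordiv N F
      let rem := PySem.Int.mod N F
      (PySem.List.pyRange 0 F 1).map (fun i => base + (if i < rem then 1 else 0))
    else
      let n_pairs := PySem.Int.floordiv F 2
      if n_pairs = 0 then List.replicate F.toNat 0
      else
        let base_pair := PySem.Int.floordiv N n_pairs
        let rem_pair := PySem.Int.mod N n_pairs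
        (PySem.List.pyRange 0 n_pairs 1).foldl
          (fun c p =>
            let T := base_pair + (if p < rem_pair then 1 else 0)
            let a := PySem.Int.floordiv T 2
            let b := T - a
            (c.set p.toNat a).set (p + n_pairs).toNat b)
          (List.replicate F.toNat 0)

-- ===== PORT B =====
-- the `deal` while-loop of Source B: peel off ceil(n/m) for the next slot, continue on the remainder
def pvDealLoop (n : Int) (m : Int) (acc : List Int) : List Int :=
  if m ≤ 0 then acc
  else
    let q := -(PySem.Int.floordiv (-n) m)
    pvDealLoop (n - q) (m - 1) (acc ++ [q])
termination_by m.toNat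
decreasing_by omega

def conteos_por_cara_parejas_opuestas_py_alt (total_curvas : Int) (num_caras : Int) : List Int :=
  let F := num_caras
  if F ≤ 0 then []
  else
    let N := max 0 total_curvas
    if PySem.Int.mod F 2 ≠ 0 then
      pvDealLoop N F []
    else
      let h := PySem.Int.floordiv F 2
      let totals := pvDealLoop N h []
      totals.map (fun t => PySem.Int.floordiv t 2)
        ++ totals.map (fun t => t - PySem.Int.floordiv t 2)

-- ===== PRECONDITION & SPEC =====
def Spec_conteos_por_cara_parejas_opuestas_py (total_curvas : Int) (num_caras : Int) (out : List Int) : Prop := out = conteos_por_cara_parejas_opuestas_py_alt total_curvas num_caras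
instance (total_curvas : Int) (num_caras : Int) (out : List Int) : Decidable (Spec_conteos_por_cara_parejas_opuestas_py total_curvas num_caras out) := by unfold Spec_conteos_por_cara_parejas_opuestas_py; infer_instance

-- ===== CLAIM (what is proved, stated in full; the proofs are below) =====
def Claim_equal_conteos_por_cara_parejas_opuestas_py : Prop := ∀ (total_curvas : Int) (num_caras : Int), Dom_conteos_por_cara_parejas_opuestas_py total_curvas num_caras → Spec_conteos_por_cara_parejas_opuestas_py total_curvas num_caras (conteos_por_cara_parejas_opuestas_py total_curvas num_caras)

-- ===== LEMMAS AND PROOFS =====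

-- the peeled share ceil(n/m) equals floor(n/m) plus one iff the remainder is positive
lemma pv_ceil_share (n m : Int) (hm : 0 < m) :
    -(PySem.Int.floordiv (-n) m) = n / m + (if 0 < n % m then 1 else 0) := by
  rw [PySem.Int.neg_floordiv_neg_eq_iff_of_pos hm]
  have hdm := Int.ediv_add_emod n m
  have hr0 := Int.emod_nonneg n (by omega : m ≠ 0)
  have hrlt := Int.emod_lt_of_pos n hm
  split_ifs with hc
  · constructor <;> nlinarith
  · constructor <;> nlinarith

-- peeling deals exactly the classic divmod distribution: the first (n % M) slots get one extra
lemma pv_deal_loop_eq (M : Nat) : ∀ (n : Int) (acc : List Int), 0 ≤ n →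
    pvDealLoop n (M : Int) acc
      = acc ++ (List.range M).map
          (fun i : Nat => n / (M : Int) + if (i : Int) < n % (M : Int) then 1 else 0) := by
  induction M with
  | zero => intro n acc _; rw [pvDealLoop]; simp
  | succ M ih =>
    intro n acc hn
    have hm1 : (0 : Int) < ((M + 1 : Nat) : Int) := by push_cast; omega
    rw [pvDealLoop, if_neg (by omega)]
    simp only []
    set m1 : Int := ((M + 1 : Nat) : Int) with hm1def
    set b : Int := n / m1 with hbdef
    set r : Int := n % m1 with hrdef
    have hq : -(PySem.Int.floordiv (-n) m1) = b + (if 0 < r then 1 else 0) :=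
      pv_ceil_share n m1 hm1
    set q : Int := -(PySem.Int.floordiv (-n) m1) with hqdef
    have hb0 : 0 ≤ b := Int.ediv_nonneg hn (le_of_lt hm1)
    have hr0 : 0 ≤ r := Int.emod_nonneg n (by omega : m1 ≠ 0)
    have hrlt : r < m1 := Int.emod_lt_of_pos n hm1
    have hdm : m1 * b + r = n := Int.ediv_add_emod n m1
    have hMval : m1 = (M : Int) + 1 := by rw [hm1def]; push_cast; ring
    have hq_le : q ≤ n := by rw [hq]; split_ifs with hc <;> nlinarith
    have hcast : m1 - 1 = (M : Int) := by omega
    rw [hcast, ih _ _ (by omega), List.append_assoc]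
    congr 1
    rw [List.range_succ_eq_map, List.map_cons, List.map_map, List.singleton_append]
    have hmb : m1 * b = (M : Int) * b + b := by rw [hMval]; ring
    refine List.cons_eq_cons.mpr ⟨by simpa using hq, ?_⟩
    rcases lt_or_ge 0 r with hr | hr
    · -- positive remainder: the peeled slot took base+1, the remainder shrinks by one
      have hqv : q = b + 1 := by rw [hq, if_pos hr]
      have hkey : n - q = (r - 1) + (M : Int) * b := by rw [hqv]; omega
      refine List.map_congr_left ?_
      intro i hi
      rw [List.mem_range] at hi
      have hM0 : (0 : Int) < (M : Int) := by omega
      have he1 : (n - q) / (M : Int) = b := by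
        rw [hkey, Int.add_mul_ediv_left _ _ (by omega : ((M : Int)) ≠ 0),
          Int.ediv_eq_zero_of_lt (by omega) (by omega), zero_add]
      have he2 : (n - q) % (M : Int) = r - 1 := by
        rw [hkey, Int.add_mul_emod_self_left, Int.emod_eq_of_lt (by omega) (by omega)]
      simp only [Function.comp_apply, he1, he2]
      have hiff : ((i : Int) < r - 1) ↔ (((i.succ : Nat) : Int) < r) := by push_cast; omega
      rw [if_congr hiff rfl rfl]
    · -- zero remainder: the peeled slot took exactly b, nothing shifts
      have hrz : r = 0 := le_antisymm hr hr0
      have hqv : q = b := by rw [hq, if_neg (by omega), add_zero]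
      have hkey : n - q = (M : Int) * b := by rw [hqv]; omega
      refine List.map_congr_left ?_
      intro i hi
      rw [List.mem_range] at hi
      have he1 : (n - q) / (M : Int) = b := by
        rw [hkey, Int.mul_ediv_cancel_left _ (by omega : ((M : Int)) ≠ 0)]
      have he2 : (n - q) % (M : Int) = 0 := by rw [hkey, Int.mul_emod_right]
      simp only [Function.comp_apply, he1, he2, hrz]
      have h1 : ¬ ((i : Int) < 0) := by omega
      have h2 : ¬ (((i.succ : Nat) : Int) < 0) := by push_cast; omega
      rw [if_neg h1, if_neg h2]

-- (helper lemmas for PORT A's write-into-array loop)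
lemma pv_set_append_len {xs ys : List Int} {n : Nat} (h : xs.length ≤ n) (a : Int) :
    (xs ++ ys).set n a = xs ++ ys.set (n - xs.length) a := by
  rw [List.set_append, if_neg (by omega)]

lemma pv_fold_set_single (H : Nat) (g : Nat → Int) :
    ∀ n, n ≤ H →
      (List.range n).foldl (fun l p => l.set p (g p)) (List.replicate H (0 : Int))
        = (List.range n).map g ++ List.replicate (H - n) 0 := by
  intro n hn
  induction n with
  | zero => simp
  | succ n ih =>
    rw [List.range_succ, List.foldl_append, ih (by omega)]
    simp only [List.foldl_cons, List.foldl_nil, List.map_append, List.map_cons, List.map_nil]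
    rw [show H - n = (H - (n + 1)) + 1 by omega, List.replicate_succ,
      pv_set_append_len (by simp)]
    simp [List.append_assoc]

lemma pv_fold_set_pair (H : Nat) (γ δ : Nat → Int) :
    ∀ n, n ≤ H →
      (List.range n).foldl (fun c p => (c.set p (γ p)).set (p + H) (δ p))
          (List.replicate (2 * H) (0 : Int))
        = ((List.range n).foldl (fun l p => l.set p (γ p)) (List.replicate H (0 : Int)))
          ++ ((List.range n).foldl (fun l p => l.set p (δ p)) (List.replicate H (0 : Int))) := by
  intro n hn
  induction n with
  | zero =>
    simp only [List.range_zero, List.foldl_nil]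
    rw [show 2 * H = H + H by omega, List.replicate_add]
  | succ n ih =>
    rw [List.range_succ, List.foldl_append, List.foldl_append, List.foldl_append, ih (by omega)]
    simp only [List.foldl_cons, List.foldl_nil]
    have hlen : ((List.range n).foldl (fun l p => l.set p (γ p)) (List.replicate H (0 : Int))).length = H := by
      rw [pv_fold_set_single H γ n (by omega)]
      simp; omega
    rw [List.set_append, if_pos (by rw [hlen]; omega),
        pv_set_append_len (by rw [List.length_set, hlen]; omega),
        List.length_set, hlen, show n + H - H = n by omega]

theorem conteos_por_cara_parejas_opuestas_py_spec : Claim_equal_conteos_por_cara_parejas_opuestas_py := by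
  intro tc nc _hdom
  unfold Spec_conteos_por_cara_parejas_opuestas_py
  show conteos_por_cara_parejas_opuestas_py tc nc = conteos_por_cara_parejas_opuestas_py_alt tc nc
  simp only [conteos_por_cara_parejas_opuestas_py, conteos_por_cara_parejas_opuestas_py_alt]
  by_cases hF : nc ≤ 0
  · simp [hF]
  rw [if_neg hF, if_neg hF]
  push_neg at hF
  have hN : (0 : Int) ≤ max 0 tc := le_max_left _ _
  set N : Int := max 0 tc with hNdef
  by_cases hodd : PySem.Int.mod nc 2 ≠ 0
  · rw [if_pos hodd, if_pos hodd]
    have hFc : ((nc.toNat : Int)) = nc := Int.toNat_of_nonneg (by omega)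
    rw [show nc = ((nc.toNat : Nat) : Int) from hFc.symm, pv_deal_loop_eq nc.toNat N [] hN,
      List.nil_append, PySem.List.pyRange_one 0 ((nc.toNat : Nat) : Int), List.map_map]
    simp only [Int.sub_zero, Int.toNat_natCast]
    refine List.map_congr_left ?_
    intro k hk
    rw [List.mem_range] at hk
    have hpos : (0 : Int) < ((nc.toNat : Nat) : Int) := by omega
    simp only [Function.comp_apply, zero_add,
      PySem.Int.floordiv_eq_ediv_of_pos hpos, PySem.Int.mod_eq_emod_of_pos hpos]
  · rw [if_neg hodd, if_neg hodd]
    have h2 : PySem.Int.floordiv nc 2 = nc / 2 := PySem.Int.floordiv_eq_ediv_of_pos (by norm_num)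
    have hmod : PySem.Int.mod nc 2 = nc % 2 := PySem.Int.mod_eq_emod_of_pos (by norm_num)
    push_neg at hodd
    rw [hmod] at hodd
    obtain ⟨H, hH⟩ : ∃ H : Nat, (H : Int) = PySem.Int.floordiv nc 2 :=
      ⟨(PySem.Int.floordiv nc 2).toNat, Int.toNat_of_nonneg (by rw [h2]; omega)⟩
    rw [h2] at hH
    have hHpos : 0 < H := by omega
    have hFtoNat : nc.toNat = 2 * H := by omega
    rw [← h2] at hH
    rw [← hH, hFtoNat]
    rw [if_neg (show ¬ ((H : Int) = 0) by exact_mod_cast hHpos.ne')]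
    have hHposI : (0 : Int) < (H : Int) := by exact_mod_cast hHpos
    rw [PySem.List.pyRange_one 0 (H : Int)]
    simp only [Int.sub_zero, Int.toNat_natCast, List.foldl_map, zero_add]
    simp only [← Nat.cast_add, Int.toNat_natCast]
    rw [pv_fold_set_pair H _ _ H (le_refl H), pv_fold_set_single H _ H (le_refl H),
        pv_fold_set_single H _ H (le_refl H), Nat.sub_self]
    simp only [List.replicate_zero, List.append_nil]
    rw [pv_deal_loop_eq H N [] hN, List.nil_append, List.map_map, List.map_map]
    have hT : ∀ k : Nat,
        (N / (H : Int) + if (k : Int) < N % (H : Int) then 1 else 0)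
          = PySem.Int.floordiv N (H : Int) + (if (k : Int) < PySem.Int.mod N (H : Int) then 1 else 0) := by
      intro k
      rw [PySem.Int.floordiv_eq_ediv_of_pos hHposI, PySem.Int.mod_eq_emod_of_pos hHposI]
    congr 1
    · refine List.map_congr_left ?_
      intro k hk
      simp only [Function.comp_apply, hT k]
    · refine List.map_congr_left ?_
      intro k hk
      simp only [Function.comp_apply, hT k]
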